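-- pv_equiv track=rewrite | github.com/BigOasis/Python | DaheeJeong/Week11/PGS_389480_완전범죄.py | solution
-- ===== SOURCE A (Python) =====
-- def solution(info, n, m):
--     length = len(info)
--     INF = float('inf')
--     # dp[i][b]: i개 아이템까지 처리했을 때, B의 누적 흔적이 b일 때 A의 최소 누적 흔적
--     dp = [[INF] * m for _ in range(length+1)]
--     dp[0][0] = 0
--
--     for i, trace in enumerate(info):
--         cost_a, cost_b = trace
--         for b in range(m):
--             if dp[i][b] == INF:
--                 continue
--             # case 1: 아이템 i를 A가 맡는 경우
--             new_a = dp[i][b] + cost_a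
--             if new_a < n:
--                 dp[i + 1][b] = min(dp[i + 1][b], new_a)
--             # case 2: 아이템 i를 B가 맡는 경우
--             new_b = b + cost_b
--             if new_b < m:
--                 dp[i + 1][new_b] = min(dp[i + 1][new_b], dp[i][b])
--
--     answer = min(dp[-1])
--     return answer if answer != INF else -1
-- ===== SOURCE B (Python) =====
-- def solution(info, n, m):
--     # dp maps A's accumulated trace -> minimal B accumulated trace among reachable states
--     dp = {0: 0}
--     for ca, cb in info:
--         nxt = {}
--         for a, b in dp.items():
--             na = a + ca
--             if na < n and b < nxt.get(na, m):
--                 nxt[na] = b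
--             nb = b + cb
--             if nb < m and nb < nxt.get(a, m):
--                 nxt[a] = nb
--         dp = nxt
--     return min(dp, default=-1)
-- ===== Notes on version B (the rewrite author's own statement) =====
-- stated objective: alternative
-- what changed: Replaces the dense (len+1) x m table indexed by B's accumulated trace (minimal A-trace per cell, float-INF sentinels, scan of all m cells per item, answer = min of the last row) by a sparse dict keyed by A's accumulated trace holding the minimal B-trace of each reachable state, iterating only over reachable states and extracting the answer as the minimum key.
-- outside the precondition, e.g. on solution([[100, -1], [100, 1]], 10, 2): A returns -1, B returns 0
import Mathlib
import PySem

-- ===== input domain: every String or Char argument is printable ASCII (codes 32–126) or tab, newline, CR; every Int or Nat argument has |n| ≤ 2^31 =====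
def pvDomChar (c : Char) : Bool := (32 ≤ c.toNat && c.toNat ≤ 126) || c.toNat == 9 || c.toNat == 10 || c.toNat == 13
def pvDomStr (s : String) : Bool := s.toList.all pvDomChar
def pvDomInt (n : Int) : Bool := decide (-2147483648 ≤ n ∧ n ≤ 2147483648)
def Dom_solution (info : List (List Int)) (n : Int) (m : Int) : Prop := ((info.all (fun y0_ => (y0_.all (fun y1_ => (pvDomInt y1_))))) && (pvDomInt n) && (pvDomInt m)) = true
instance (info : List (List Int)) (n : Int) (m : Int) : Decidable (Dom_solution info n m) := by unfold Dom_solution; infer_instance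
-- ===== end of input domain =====

-- B replaces A's dense (len+1)×m table indexed by B's trace (min A-trace per cell, INF sentinels,
-- full scan of all m cells per item, answer = min of last row) by a sparse dict keyed by A's
-- accumulated trace holding the minimal B-trace of each reachable state; answer = minimum key.

-- ===== PORT A =====

-- 'cost_a, cost_b = trace': Python raises ValueError unless the row has exactly 2 elements (excluded by Pre_)
def unpack2 (t : List Int) : Int × Int :=
  match t with
  | [x, y] => (x, y)
  | _ => (0, 0)

-- min where either side may be float('inf'), encoded as none
def pyMinInf : Option Int → Option Int → Option Int
  | none, y => y
  | some x, none => some x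
  | some x, some y => some (min x y)

-- case 1: item i taken by A; dp[i+1][b] = min(dp[i+1][b], dp[i][b] + cost_a) if new_a < n
def aCase1 (n ca a : Int) (nxt : List (Option Int)) (b : Nat) : List (Option Int) :=
  if a + ca < n then nxt.set b (pyMinInf (nxt.getD b none) (some (a + ca))) else nxt

-- case 2: item i taken by B; dp[i+1][new_b] = min(dp[i+1][new_b], dp[i][b]) if new_b < m
-- (the index expression applies Python's one-step negative-index wraparound, reachable only outside Pre_)
def aCase2 (m cb a : Int) (nxt1 : List (Option Int)) (b : Nat) : List (Option Int) :=
  if (b : Int) + cb < m then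
    nxt1.set (if (b : Int) + cb < 0 then (b : Int) + cb + m else (b : Int) + cb).toNat
      (pyMinInf (nxt1.getD (if (b : Int) + cb < 0 then (b : Int) + cb + m else (b : Int) + cb).toNat none)
        (some a))
  else nxt1

-- body of 'for b in range(m)': reads row dp[i] (prev), updates row dp[i+1] (nxt) in place
def aInnerBody (n m ca cb : Int) (prev : List (Option Int)) (nxt : List (Option Int)) (b : Nat) : List (Option Int) :=
  match prev.getD b none with
  | none => nxt
  | some a => aCase2 m cb a (aCase1 n ca a nxt b) b

-- dp as the list of its rows, first row dp[0][0] = 0; Python preallocates all rows and mutates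
-- row i+1 while reading row i, which equals appending each freshly computed row; at the end
-- min(dp[-1]) with none = float('inf'), and 'answer if answer != INF else -1'
def solution (info : List (List Int)) (n : Int) (m : Int) : Int :=
  match ((info.foldl (fun rows trace =>
      rows ++ [(List.range m.toNat).foldl
        (aInnerBody n m (unpack2 trace).1 (unpack2 trace).2 (rows.getLastD []))
        (List.replicate m.toNat none)])
      [(List.replicate m.toNat (none : Option Int)).set 0 (some 0)]).getLastD []).foldl
      pyMinInf none with
  | some a => a
  | none => -1

-- ===== PORT B =====

-- one item of dp.items: conditional min-inserts into the fresh layer (all stored values are < m,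
-- so m itself is the 'absent' default of nxt.get(..., m))
def bInnerBody (n m ca cb : Int) (nxt : PySem.Dict Int Int) (p : Int × Int) : PySem.Dict Int Int :=
  let na := p.1 + ca
  let nxt1 := if na < n ∧ p.2 < nxt.getD na m then nxt.insert na p.2 else nxt
  let nb := p.2 + cb
  if nb < m ∧ nb < nxt1.getD p.1 m then nxt1.insert p.1 nb else nxt1

-- dp = {0: 0}; each item rebuilds dp from its items; min(dp, default=-1) = min over the keys
def solution_alt (info : List (List Int)) (n : Int) (m : Int) : Int :=
  PySem.List.minD
    ((info.foldl (fun dp trace =>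
        dp.items.foldl (bInnerBody n m (unpack2 trace).1 (unpack2 trace).2) PySem.Dict.empty)
      (PySem.Dict.empty.insert 0 0)).keys)
    (fun x => x) (-1)

-- ===== PRECONDITION & SPEC =====
-- Pre_ excludes m < 1 and trace rows whose length is not 2 (A raises IndexError / ValueError there),
-- and traces with a negative B-cost, on which A's negative dp index wraps around and credits the
-- state to an accidental B-trace bucket (A raises when the index underflows below -m).
def Pre_solution (info : List (List Int)) (n : Int) (m : Int) : Prop :=
  1 ≤ m ∧ ∀ t ∈ info, t.length = 2 ∧ 0 ≤ t.getD 1 0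
instance (info : List (List Int)) (n : Int) (m : Int) : Decidable (Pre_solution info n m) := by
  unfold Pre_solution; infer_instance

def pvWitness_solution : List (List Int) × Int × Int := ([[1, 1]], 2, 2)

def Spec_solution (info : List (List Int)) (n : Int) (m : Int) (out : Int) : Prop := out = solution_alt info n m
instance (info : List (List Int)) (n : Int) (m : Int) (out : Int) : Decidable (Spec_solution info n m out) := by unfold Spec_solution; infer_instance

-- ===== CLAIM (what is proved, stated in full; the proofs are below) =====
def Claim_equal_solution : Prop := ∀ (info : List (List Int)) (n : Int) (m : Int), Dom_solution info n m → Pre_solution info n m → Spec_solution info n m (solution info n m)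

-- ===== LEMMAS AND PROOFS =====

-- semantic model: the list (with duplicates) of reachable (A-trace, B-trace) states
def stepS (n m ca cb : Int) (S : List (Int × Int)) : List (Int × Int) :=
  S.flatMap (fun p => (if p.1 + ca < n then [(p.1 + ca, p.2)] else []) ++ (if p.2 + cb < m then [(p.1, p.2 + cb)] else []))

def lminO (l : List (Option Int)) : Option Int := l.foldr pyMinInf none
def colA (S : List (Int × Int)) (j : Int) : Option Int := lminO (S.map (fun p => if p.2 = j then some p.1 else none))
def rowB (S : List (Int × Int)) (a : Int) : Option Int := lminO (S.map (fun p => if p.1 = a then some p.2 else none))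
def fstMin (S : List (Int × Int)) : Option Int := lminO (S.map (fun p => some p.1))
def Bnd (m : Int) (S : List (Int × Int)) : Prop := ∀ p ∈ S, 0 ≤ p.2 ∧ p.2 < m
def gShift (c lim : Int) (o : Option Int) : Option Int := o.bind (fun x => if x + c < lim then some (x + c) else none)

theorem pyMinInf_none_right (x : Option Int) : pyMinInf x none = x := by cases x <;> rfl
theorem pyMinInf_assoc (x y z : Option Int) : pyMinInf (pyMinInf x y) z = pyMinInf x (pyMinInf y z) := by
  cases x <;> cases y <;> cases z <;> simp [pyMinInf, min_assoc]
theorem pyMinInf_swap (a b c d : Option Int) :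
    pyMinInf (pyMinInf a b) (pyMinInf c d) = pyMinInf (pyMinInf a c) (pyMinInf b d) := by
  cases a <;> cases b <;> cases c <;> cases d <;>
    simp [pyMinInf, min_comm, min_left_comm]
theorem pyMinInf_eq_none_iff (x y : Option Int) : pyMinInf x y = none ↔ x = none ∧ y = none := by
  cases x <;> cases y <;> simp [pyMinInf]
theorem lminO_eq_none_forall {l : List (Option Int)} (h : l.foldr pyMinInf none = none) :
    ∀ x ∈ l, x = none := by
  induction l with
  | nil => simp
  | cons x l ih =>
    rw [List.foldr_cons, pyMinInf_eq_none_iff] at h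
    intro y hy
    rcases List.mem_cons.1 hy with rfl | hyl
    · exact h.1
    · exact ih h.2 y hyl
theorem gShift_none (c lim : Int) : gShift c lim none = none := rfl
theorem gShift_min (c lim : Int) (x y : Option Int) :
    gShift c lim (pyMinInf x y) = pyMinInf (gShift c lim x) (gShift c lim y) := by
  cases x with
  | none => rfl
  | some a =>
    cases y with
    | none =>
      show gShift c lim (some a) = pyMinInf (gShift c lim (some a)) (gShift c lim none)
      rw [gShift_none, pyMinInf_none_right]
    | some b =>
      simp only [gShift, pyMinInf, Option.bind_some]
      split_ifs <;> (try simp [pyMinInf]) <;> (try rfl) <;> omega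

theorem lminO_cons (x : Option Int) (l : List (Option Int)) : lminO (x :: l) = pyMinInf x (lminO l) := rfl
theorem lminO_foldr_acc (l : List (Option Int)) (acc : Option Int) :
    l.foldr pyMinInf acc = pyMinInf (lminO l) acc := by
  induction l with
  | nil => simp [lminO, pyMinInf]
  | cons x l ih => simp [lminO, List.foldr_cons, ih, pyMinInf_assoc]
theorem lminO_append (l₁ l₂ : List (Option Int)) : lminO (l₁ ++ l₂) = pyMinInf (lminO l₁) (lminO l₂) := by
  unfold lminO
  rw [List.foldr_append, lminO_foldr_acc]
  rfl
theorem foldl_pyMinInf (l : List (Option Int)) (acc : Option Int) :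
    l.foldl pyMinInf acc = pyMinInf acc (lminO l) := by
  induction l generalizing acc with
  | nil => simp [lminO, pyMinInf_none_right]
  | cons x l ih => rw [List.foldl_cons, ih, lminO_cons, pyMinInf_assoc]
theorem lminO_of_all_none {l : List (Option Int)} (h : ∀ x ∈ l, x = none) : lminO l = none := by
  induction l with
  | nil => rfl
  | cons x l ih =>
    rw [lminO_cons, h x (by simp), ih fun y hy => h y (by simp [hy])]
    rfl
theorem lminO_map_min {α : Type} (l : List α) (f g : α → Option Int) :
    lminO (l.map (fun x => pyMinInf (f x) (g x))) = pyMinInf (lminO (l.map f)) (lminO (l.map g)) := by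
  induction l with
  | nil => rfl
  | cons x l ih => simp only [List.map_cons, lminO_cons, ih, pyMinInf_swap]
theorem lminO_map_gShift {α : Type} (c lim : Int) (l : List α) (f : α → Option Int) :
    lminO (l.map (fun x => gShift c lim (f x))) = gShift c lim (lminO (l.map f)) := by
  induction l with
  | nil => rfl
  | cons x l ih => simp only [List.map_cons, lminO_cons, ih, gShift_min]
theorem lminO_some_mem {l : List (Option Int)} {v : Int} (h : lminO l = some v) : some v ∈ l := by
  induction l with
  | nil => simp [lminO] at h
  | cons x l ih =>
    rw [lminO_cons] at h
    cases hx : x with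
    | none => rw [hx] at h; exact List.mem_cons_of_mem _ (ih h)
    | some a =>
      rw [hx] at h
      cases hl : lminO l with
      | none => rw [hl] at h; simp [pyMinInf] at h; simp [h]
      | some b =>
        rw [hl] at h; simp [pyMinInf] at h
        rcases min_choice a b with hc | hc <;> rw [h] at hc
        · simp [hc.symm]
        · exact List.mem_cons_of_mem _ (ih (by rw [hl, hc]))
theorem lminO_le {l : List (Option Int)} {v : Int} (h : lminO l = some v) :
    ∀ x ∈ l, ∀ w, x = some w → v ≤ w := by
  induction l generalizing v with
  | nil => simp
  | cons x l ih =>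
    intro y hy w hw
    rw [lminO_cons] at h
    rcases List.mem_cons.1 hy with rfl | hyl
    · cases hl : lminO l with
      | none =>
        rw [hl, pyMinInf_none_right, hw] at h
        simp at h
        omega
      | some b => rw [hl, hw] at h; simp [pyMinInf] at h; omega
    · cases hl : lminO l with
      | none =>
        have hynone : y = none := lminO_eq_none_forall hl y hyl
        simp [hynone] at hw
      | some b =>
        have hb := ih hl y hyl w hw
        cases hx : x with
        | none => rw [hx, hl] at h; simp [pyMinInf] at h; omega
        | some a => rw [hx, hl] at h; simp [pyMinInf] at h; omega
-- unique hit in a list with nodup indices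
theorem lminO_map_ite_nodup {α : Type} [DecidableEq α] (l : List α) (j0 : α) (x : Option Int)
    (hnd : l.Nodup) (hmem : j0 ∈ l) :
    lminO (l.map (fun j => if j = j0 then x else none)) = x := by
  induction l with
  | nil => simp at hmem
  | cons a l ih =>
    rw [List.map_cons, lminO_cons]
    rcases List.nodup_cons.1 hnd with ⟨hna, hndl⟩
    by_cases ha : a = j0
    · subst ha
      rw [if_pos rfl, lminO_of_all_none (by
        intro y hy
        rcases List.mem_map.1 hy with ⟨j, hj, rfl⟩
        rw [if_neg (by rintro rfl; exact hna hj)]), pyMinInf_none_right]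
    · rw [if_neg ha]
      rcases List.mem_cons.1 hmem with h | h
      · exact absurd h.symm ha
      · exact ih hndl h
theorem lookup_of_nodup_fst (l : List (Int × Int)) (q v : Int)
    (hnd : (l.map Prod.fst).Nodup) (hmem : (q, v) ∈ l) :
    lminO (l.map (fun p => if p.1 = q then some p.2 else none)) = some v := by
  induction l with
  | nil => simp at hmem
  | cons p l ih =>
    rw [List.map_cons, lminO_cons]
    rw [List.map_cons, List.nodup_cons] at hnd
    by_cases hp : p.1 = q
    · have hv : p.2 = v := by
        rcases List.mem_cons.1 hmem with h | h
        · rw [← h]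
        · exact absurd (hp ▸ List.mem_map_of_mem (f := Prod.fst) h) hnd.1
      rw [if_pos hp, hv, lminO_of_all_none (by
        intro y hy
        rcases List.mem_map.1 hy with ⟨r, hr, rfl⟩
        rw [if_neg (by rintro h; exact hnd.1 (hp ▸ h ▸ List.mem_map_of_mem (f := Prod.fst) hr))]),
        pyMinInf_none_right]
    · rw [if_neg hp]
      refine ih hnd.2 ?_
      rcases List.mem_cons.1 hmem with h | h
      · exact absurd (by rw [← h]) hp
      · exact h

-- === step lemmas for the semantic model ===
theorem colA_neg {m : Int} {S : List (Int × Int)} (hS : Bnd m S) {j : Int} (hj : j < 0) : colA S j = none := by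
  refine lminO_of_all_none ?_
  intro x hx
  rcases List.mem_map.1 hx with ⟨p, hp, rfl⟩
  rw [if_neg (by have := hS p hp; omega)]
theorem colA_step (n m ca cb : Int) (S : List (Int × Int)) (j : Int) (hj0 : 0 ≤ j) (hjm : j < m) :
    colA (stepS n m ca cb S) j = pyMinInf (gShift ca n (colA S j)) (colA S (j - cb)) := by
  induction S with
  | nil => simp [stepS, colA, lminO, gShift]; rfl
  | cons p S ih =>
    have hstep : stepS n m ca cb (p :: S) =
        ((if p.1 + ca < n then [(p.1 + ca, p.2)] else []) ++
          (if p.2 + cb < m then [(p.1, p.2 + cb)] else [])) ++ stepS n m ca cb S := by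
      simp [stepS]
    rw [hstep]
    unfold colA at ih ⊢
    rw [List.map_append, lminO_append, ih]
    simp only [List.map_cons, lminO_cons]
    rw [gShift_min]
    have hH : lminO (((if p.1 + ca < n then [(p.1 + ca, p.2)] else []) ++
          (if p.2 + cb < m then [(p.1, p.2 + cb)] else [])).map
          (fun q => if q.2 = j then some q.1 else none)) =
        pyMinInf (gShift ca n (if p.2 = j then some p.1 else none))
                 (if p.2 = j - cb then some p.1 else none) := by
      split_ifs <;> simp_all [lminO, pyMinInf, gShift] <;> (try split_ifs) <;>
        (try simp [pyMinInf]) <;> (try rfl) <;> (try omega)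
    rw [hH, pyMinInf_swap]
theorem rowB_step (n m ca cb : Int) (S : List (Int × Int)) (k : Int) :
    rowB (stepS n m ca cb S) k =
      pyMinInf (if k < n then rowB S (k - ca) else none) (gShift cb m (rowB S k)) := by
  induction S with
  | nil => simp [stepS, rowB, lminO, gShift]; rfl
  | cons p S ih =>
    have hstep : stepS n m ca cb (p :: S) =
        ((if p.1 + ca < n then [(p.1 + ca, p.2)] else []) ++
          (if p.2 + cb < m then [(p.1, p.2 + cb)] else [])) ++ stepS n m ca cb S := by
      simp [stepS]
    rw [hstep]
    unfold rowB at ih ⊢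
    rw [List.map_append, lminO_append, ih]
    simp only [List.map_cons, lminO_cons]
    rw [gShift_min]
    have hite : (if k < n then pyMinInf (if p.1 = k - ca then some p.2 else none)
          (lminO (S.map (fun q => if q.1 = k - ca then some q.2 else none))) else none) =
        pyMinInf (if k < n then (if p.1 = k - ca then some p.2 else none) else none)
          (if k < n then lminO (S.map (fun q => if q.1 = k - ca then some q.2 else none)) else none) := by
      split_ifs <;> simp [pyMinInf]
    rw [hite]
    have hH : lminO (((if p.1 + ca < n then [(p.1 + ca, p.2)] else []) ++
          (if p.2 + cb < m then [(p.1, p.2 + cb)] else [])).map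
          (fun q => if q.1 = k then some q.2 else none)) =
        pyMinInf (if k < n then (if p.1 = k - ca then some p.2 else none) else none)
                 (gShift cb m (if p.1 = k then some p.2 else none)) := by
      clear ih
      split_ifs <;> simp [lminO, pyMinInf, gShift] <;> (try split_ifs) <;>
        (try simp [pyMinInf]) <;> (try rfl) <;> (try omega)
    rw [hH, pyMinInf_swap]
theorem bnd_stepS {n m ca cb : Int} (hcb : 0 ≤ cb) {S : List (Int × Int)} (hS : Bnd m S) :
    Bnd m (stepS n m ca cb S) := by
  intro p hp
  rcases List.mem_flatMap.1 hp with ⟨q, hq, hmem⟩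
  have hqb := hS q hq
  rcases List.mem_append.1 hmem with h | h <;> split_ifs at h <;> simp at h <;>
    (try subst h) <;> simp_all <;> omega
theorem rowB_some_lt {m : Int} {S : List (Int × Int)} (hS : Bnd m S) (a : Int) :
    ∀ v, rowB S a = some v → v < m := by
  intro v hv
  rcases List.mem_map.1 (lminO_some_mem hv) with ⟨p, hp, heq⟩
  have := hS p hp
  split_ifs at heq <;> simp_all
theorem rowB_eq_none_iff (S : List (Int × Int)) (a : Int) :
    rowB S a = none ↔ a ∉ S.map Prod.fst := by
  induction S with
  | nil => simp [rowB, lminO]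
  | cons p S ih =>
    rw [rowB] at ih ⊢
    rw [List.map_cons, lminO_cons, pyMinInf_eq_none_iff, ih]
    constructor
    · rintro ⟨h1, h2⟩ hmem
      rcases List.mem_cons.1 hmem with h | h
      · rw [if_pos h.symm] at h1; exact Option.some_ne_none _ h1
      · exact h2 (by simpa using h)
    · intro h
      refine ⟨?_, by intro hm; exact h (List.mem_cons_of_mem _ (by simpa using hm))⟩
      rw [if_neg (by intro hp; exact h (by simp [← hp]))]
-- === A side: the inner loop computes per-cell pyMinInf of the two pull-contributions ===
theorem getDset (l : List (Option Int)) (i j : Nat) (v : Option Int) :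
    (l.set i v).getD j none = if i = j ∧ i < l.length then v else l.getD j none := by
  by_cases hij : i = j
  · subst hij
    by_cases hl : i < l.length
    · simp [List.getD_eq_getElem?_getD, List.getElem?_set, hl]
    · simp [List.getD_eq_getElem?_getD, List.getElem?_set, hl,
        List.getElem?_eq_none (by omega : l.length ≤ i)]
  · simp [List.getD_eq_getElem?_getD, List.getElem?_set, hij]

theorem aCase1_getD (n ca a : Int) (nxt : List (Option Int)) (b j : Nat) (hj : j < nxt.length) :
    (aCase1 n ca a nxt b).getD j none =
      pyMinInf (nxt.getD j none) (if j = b ∧ a + ca < n then some (a + ca) else none) := by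
  unfold aCase1
  by_cases hg : a + ca < n
  · rw [if_pos hg, getDset]
    by_cases hbj : b = j
    · rw [if_pos ⟨hbj, by omega⟩, if_pos ⟨hbj.symm, hg⟩, hbj]
    · rw [if_neg (by tauto), if_neg (by tauto), pyMinInf_none_right]
  · rw [if_neg hg, if_neg (by tauto), pyMinInf_none_right]

theorem aCase1_len (n ca a : Int) (nxt : List (Option Int)) (b : Nat) :
    (aCase1 n ca a nxt b).length = nxt.length := by
  unfold aCase1; split_ifs <;> simp

theorem aCase2_getD (m cb a : Int) (hcb : 0 ≤ cb) (nxt1 : List (Option Int)) (b j : Nat)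
    (hlen : nxt1.length = m.toNat) (hj : j < m.toNat) :
    (aCase2 m cb a nxt1 b).getD j none =
      pyMinInf (nxt1.getD j none)
        (if (j : Int) = (b : Int) + cb ∧ (b : Int) + cb < m then some a else none) := by
  unfold aCase2
  have hwrap : ¬((b : Int) + cb < 0) := by omega
  rw [if_neg hwrap]
  by_cases hg : (b : Int) + cb < m
  · rw [if_pos hg, getDset]
    by_cases hbj : ((b : Int) + cb).toNat = j
    · rw [if_pos ⟨hbj, by omega⟩, if_pos ⟨by omega, hg⟩, hbj]
    · rw [if_neg (by tauto), if_neg (by rintro ⟨h, -⟩; exact hbj (by omega)), pyMinInf_none_right]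
  · rw [if_neg hg, if_neg (by tauto), pyMinInf_none_right]

theorem aCase2_len (m cb a : Int) (nxt1 : List (Option Int)) (b : Nat) :
    (aCase2 m cb a nxt1 b).length = nxt1.length := by
  unfold aCase2
  split_ifs <;> simp

theorem aBody_len (n m ca cb : Int) (prev nxt : List (Option Int)) (b : Nat) :
    (aInnerBody n m ca cb prev nxt b).length = nxt.length := by
  unfold aInnerBody
  cases prev.getD b none with
  | none => rfl
  | some a => rw [aCase2_len, aCase1_len]

theorem aBody_getD (n m ca cb : Int) (hcb : 0 ≤ cb) (prev nxt : List (Option Int))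
    (hlen : nxt.length = m.toNat) (b j : Nat) (hj : j < m.toNat) :
    (aInnerBody n m ca cb prev nxt b).getD j none =
      pyMinInf (nxt.getD j none)
        (pyMinInf (if j = b then gShift ca n (prev.getD b none) else none)
                  (if (j : Int) = (b : Int) + cb ∧ (b : Int) + cb < m then prev.getD b none
                   else none)) := by
  unfold aInnerBody
  cases hpk : prev.getD b none with
  | none =>
    have h1 : (if j = b then gShift ca n (none : Option Int) else none) = none := by
      split_ifs <;> rfl
    have h2 : (if (j : Int) = (b : Int) + cb ∧ (b : Int) + cb < m then (none : Option Int)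
        else none) = none := by split_ifs <;> rfl
    rw [h1, h2, pyMinInf_none_right, pyMinInf_none_right]
  | some a =>
    rw [aCase2_getD m cb a hcb _ b j (by rw [aCase1_len]; exact hlen) hj,
      aCase1_getD n ca a nxt b j (by omega), pyMinInf_assoc]
    congr 2
    by_cases hjb : j = b
    · subst hjb
      by_cases hg : a + ca < n
      · rw [if_pos ⟨rfl, hg⟩, if_pos rfl]
        simp [gShift, hg]
      · rw [if_neg (by tauto), if_pos rfl]
        simp [gShift, hg]
    · rw [if_neg (by tauto), if_neg hjb]

theorem aInner_aux (n m ca cb : Int) (hcb : 0 ≤ cb) (prev : List (Option Int)) :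
    ∀ k : Nat, k ≤ m.toNat →
      ((List.range k).foldl (aInnerBody n m ca cb prev) (List.replicate m.toNat none)).length = m.toNat ∧
      ∀ j : Nat, j < m.toNat →
        ((List.range k).foldl (aInnerBody n m ca cb prev) (List.replicate m.toNat none)).getD j none =
          pyMinInf (if j < k then gShift ca n (prev.getD j none) else none)
                   (if (j : Int) < (k : Int) + cb ∧ cb.toNat ≤ j then prev.getD (j - cb.toNat) none
                    else none) := by
  intro k
  induction k with
  | zero =>
    intro _
    refine ⟨by simp, ?_⟩
    intro j hj
    rw [List.range_zero, List.foldl_nil, List.getD_eq_getElem?_getD, List.getElem?_replicate,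
      if_pos hj]
    rw [if_neg (by omega), if_neg (by omega)]
    rfl
  | succ k ih =>
    intro hk1
    obtain ⟨hNlen, hNget⟩ := ih (by omega)
    rw [List.range_succ, List.foldl_append, List.foldl_cons, List.foldl_nil]
    refine ⟨by rw [aBody_len]; exact hNlen, ?_⟩
    intro j hj
    rw [aBody_getD n m ca cb hcb prev _ hNlen k j hj, hNget j hj, pyMinInf_swap]
    congr 1
    · by_cases h1 : j < k
      · rw [if_neg (show ¬(j = k) by omega), pyMinInf_none_right, if_pos h1,
          if_pos (show j < k + 1 by omega)]
      · by_cases h2 : j = k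
        · subst h2
          rw [if_neg (show ¬(j < j) by omega), if_pos rfl, if_pos (show j < j + 1 by omega)]
          rfl
        · rw [if_neg h1, if_neg h2, if_neg (show ¬(j < k + 1) by omega), pyMinInf_none_right]
    · by_cases h1 : (j : Int) < (k : Int) + cb ∧ cb.toNat ≤ j
      · rw [if_neg (show ¬((j : Int) = (k : Int) + cb ∧ (k : Int) + cb < m) by omega),
          pyMinInf_none_right, if_pos h1,
          if_pos (show (j : Int) < ((k + 1 : Nat) : Int) + cb ∧ cb.toNat ≤ j by push_cast; omega)]
      · by_cases h2 : (j : Int) = (k : Int) + cb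
        · rw [if_neg h1,
            if_pos (show (j : Int) = (k : Int) + cb ∧ (k : Int) + cb < m from ⟨h2, by omega⟩),
            if_pos (show (j : Int) < ((k + 1 : Nat) : Int) + cb ∧ cb.toNat ≤ j by push_cast; omega),
            show j - cb.toNat = k by omega]
          rfl
        · rw [if_neg h1,
            if_neg (show ¬((j : Int) = (k : Int) + cb ∧ (k : Int) + cb < m) by tauto),
            if_neg (show ¬((j : Int) < ((k + 1 : Nat) : Int) + cb ∧ cb.toNat ≤ j) by
              push_cast; omega),
            pyMinInf_none_right]

theorem aInner_spec (n m ca cb : Int) (hm : 1 ≤ m) (hcb : 0 ≤ cb) (prev : List (Option Int))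
    (hlen : prev.length = m.toNat) :
    ((List.range m.toNat).foldl (aInnerBody n m ca cb prev) (List.replicate m.toNat none)).length = m.toNat ∧
    ∀ j : Nat, j < m.toNat →
      ((List.range m.toNat).foldl (aInnerBody n m ca cb prev) (List.replicate m.toNat none)).getD j none =
        pyMinInf (gShift ca n (prev.getD j none))
                 (if cb.toNat ≤ j then prev.getD (j - cb.toNat) none else none) := by
  obtain ⟨h1, h2⟩ := aInner_aux n m ca cb hcb prev m.toNat le_rfl
  refine ⟨h1, ?_⟩
  intro j hj
  rw [h2 j hj, if_pos hj]
  congr 1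
  by_cases hb : cb.toNat ≤ j
  · rw [if_pos ⟨by omega, hb⟩, if_pos hb]
  · rw [if_neg (by tauto), if_neg hb]

theorem aRow_step (n m ca cb : Int) (hm : 1 ≤ m) (hcb : 0 ≤ cb) (prev : List (Option Int))
    (S : List (Int × Int)) (hS : Bnd m S) (hlen : prev.length = m.toNat)
    (hprev : ∀ j : Nat, j < m.toNat → prev.getD j none = colA S j) :
    ((List.range m.toNat).foldl (aInnerBody n m ca cb prev) (List.replicate m.toNat none)).length = m.toNat ∧
    ∀ j : Nat, j < m.toNat →
      ((List.range m.toNat).foldl (aInnerBody n m ca cb prev) (List.replicate m.toNat none)).getD j none =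
        colA (stepS n m ca cb S) j := by
  obtain ⟨h1, h2⟩ := aInner_spec n m ca cb hm hcb prev hlen
  refine ⟨h1, ?_⟩
  intro j hj
  rw [h2 j hj, colA_step n m ca cb S j (by omega) (by omega), hprev j hj]
  congr 1
  by_cases hb : cb.toNat ≤ j
  · rw [if_pos hb, hprev _ (by omega), show ((j - cb.toNat : Nat) : Int) = (j : Int) - cb by omega]
  · rw [if_neg hb, colA_neg hS (by omega : (j : Int) - cb < 0)]

-- === B side ===
theorem condInsert_get? (m : Int) (d : PySem.Dict Int Int) (C : Prop) [Decidable C] (key v k : Int)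
    (hvm : C → v < m) (hvals : ∀ q w, d.get? q = some w → w < m) :
    (if C ∧ v < d.getD key m then d.insert key v else d).get? k =
      pyMinInf (d.get? k) (if key = k ∧ C then some v else none) := by
  by_cases hC : C
  · rw [PySem.Dict.getD_eq_get?_getD]
    cases hq : d.get? key with
    | none =>
      simp only [Option.getD_none]
      rw [if_pos ⟨hC, hvm hC⟩, PySem.Dict.get?_insert]
      by_cases hk : k = key
      · subst hk; rw [if_pos rfl, if_pos ⟨rfl, hC⟩, hq]; rfl
      · rw [if_neg hk, if_neg (by rintro ⟨rfl, -⟩; exact hk rfl), pyMinInf_none_right]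
    | some w =>
      have hwm := hvals _ _ hq
      simp only [Option.getD_some]
      by_cases hvw : v < w
      · rw [if_pos ⟨hC, hvw⟩, PySem.Dict.get?_insert]
        by_cases hk : k = key
        · subst hk; rw [if_pos rfl, if_pos ⟨rfl, hC⟩, hq]; simp [pyMinInf]; omega
        · rw [if_neg hk, if_neg (by rintro ⟨rfl, -⟩; exact hk rfl), pyMinInf_none_right]
      · rw [if_neg (by rintro ⟨-, h⟩; exact hvw h)]
        by_cases hk : k = key
        · subst hk; rw [if_pos ⟨rfl, hC⟩, hq]; simp [pyMinInf]; omega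
        · rw [if_neg (by rintro ⟨rfl, -⟩; exact hk rfl), pyMinInf_none_right]
  · rw [if_neg (by rintro ⟨h, -⟩; exact hC h), if_neg (by rintro ⟨-, h⟩; exact hC h),
      pyMinInf_none_right]

theorem condInsert_bound (m : Int) (d : PySem.Dict Int Int) (C : Prop) [Decidable C] (key v : Int)
    (hvm : C → v < m) (hvals : ∀ q w, d.get? q = some w → w < m) :
    ∀ q w, (if C ∧ v < d.getD key m then d.insert key v else d).get? q = some w → w < m := by
  intro q w h
  split_ifs at h with hc
  · rw [PySem.Dict.get?_insert] at h
    split_ifs at h with hq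
    · cases h; exact hvm hc.1
    · exact hvals _ _ h
  · exact hvals _ _ h

theorem condInsert_nodup (d : PySem.Dict Int Int) (C : Prop) [Decidable C] (key v : Int)
    (hnd : d.keys.Nodup) : (if C ∧ v < d.getD key m then d.insert key v else d).keys.Nodup := by
  split_ifs
  · exact PySem.Dict.nodup_keys_insert d key v hnd
  · exact hnd

def itemContrib (n m ca cb : Int) (p : Int × Int) (k : Int) : Option Int :=
  pyMinInf (if p.1 + ca = k ∧ k < n then some p.2 else none)
           (if p.1 = k ∧ p.2 + cb < m then some (p.2 + cb) else none)

theorem bBody_get? (n m ca cb : Int) (nxt : PySem.Dict Int Int) (p : Int × Int) (k : Int)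
    (hvals : ∀ q v, nxt.get? q = some v → v < m) (hb : p.2 < m) :
    (bInnerBody n m ca cb nxt p).get? k = pyMinInf (nxt.get? k) (itemContrib n m ca cb p k) := by
  unfold bInnerBody itemContrib
  rw [condInsert_get? m _ _ _ _ k (fun h => h) (condInsert_bound m _ _ _ _ (fun _ => hb) hvals),
    condInsert_get? m _ _ _ _ k (fun _ => hb) hvals, pyMinInf_assoc]
  congr 2
  exact if_congr (by omega) rfl rfl
theorem bBody_bound (n m ca cb : Int) (nxt : PySem.Dict Int Int) (p : Int × Int)
    (hvals : ∀ q v, nxt.get? q = some v → v < m) (hb : p.2 < m) :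
    ∀ q v, (bInnerBody n m ca cb nxt p).get? q = some v → v < m := by
  unfold bInnerBody
  exact condInsert_bound m _ _ _ _ (fun h => h) (condInsert_bound m _ _ _ _ (fun _ => hb) hvals)
theorem bBody_nodup (n m ca cb : Int) (nxt : PySem.Dict Int Int) (p : Int × Int)
    (hnd : nxt.keys.Nodup) : (bInnerBody n m ca cb nxt p).keys.Nodup := by
  unfold bInnerBody
  exact condInsert_nodup _ _ _ _ (condInsert_nodup _ _ _ _ hnd)
theorem bFold_get? (n m ca cb : Int) (k : Int) :
    ∀ (its : List (Int × Int)) (d0 : PySem.Dict Int Int),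
      (∀ q v, d0.get? q = some v → v < m) → (∀ p ∈ its, p.2 < m) →
      (its.foldl (bInnerBody n m ca cb) d0).get? k =
        pyMinInf (d0.get? k) (lminO (its.map (fun p => itemContrib n m ca cb p k))) := by
  intro its
  induction its with
  | nil => intro d0 _ _; rw [List.foldl_nil, List.map_nil]; exact (pyMinInf_none_right _).symm
  | cons p its ih =>
    intro d0 hvals hits
    rw [List.foldl_cons,
      ih _ (bBody_bound n m ca cb d0 p hvals (hits p (List.mem_cons_self)))
        (fun q hq => hits q (List.mem_cons_of_mem _ hq)),
      bBody_get? n m ca cb d0 p k hvals (hits p (List.mem_cons_self)),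
      List.map_cons, lminO_cons, pyMinInf_assoc]
theorem bFold_nodup (n m ca cb : Int) (its : List (Int × Int)) (d0 : PySem.Dict Int Int)
    (hnd : d0.keys.Nodup) : (its.foldl (bInnerBody n m ca cb) d0).keys.Nodup := by
  induction its generalizing d0 with
  | nil => exact hnd
  | cons p its ih => exact ih _ (bBody_nodup n m ca cb d0 p hnd)
theorem items_lookup (d : PySem.Dict Int Int) (q : Int) (hnd : d.keys.Nodup) :
    lminO (d.items.map (fun p => if p.1 = q then some p.2 else none)) = d.get? q := by
  cases h : d.get? q with
  | none =>
    refine lminO_of_all_none ?_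
    intro x hx
    rcases List.mem_map.1 hx with ⟨p, hp, rfl⟩
    rw [if_neg ?_]
    intro hpq
    exact (PySem.Dict.get?_eq_none_iff_not_mem_keys d q).1 h
      (hpq ▸ PySem.Dict.mem_keys_of_mem_items d hp)
  | some v =>
    have hmem := PySem.Dict.mem_items_of_get?_eq_some d h
    have hkeys : d.keys = d.items.map Prod.fst := by cases d; rfl
    exact lookup_of_nodup_fst _ _ _ (hkeys ▸ hnd) hmem
theorem bDict_step (n m ca cb : Int) (dp : PySem.Dict Int Int) (S : List (Int × Int))
    (hS : Bnd m S) (hnd : dp.keys.Nodup) (hdp : ∀ a, dp.get? a = rowB S a) (k : Int) :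
    (dp.items.foldl (bInnerBody n m ca cb) PySem.Dict.empty).get? k = rowB (stepS n m ca cb S) k := by
  have hits : ∀ p ∈ dp.items, p.2 < m := by
    intro p hp
    have hg : dp.get? p.1 = some p.2 := PySem.Dict.get?_of_mem_items dp (by simpa using hp) hnd
    exact rowB_some_lt hS p.1 p.2 (by rw [← hdp]; exact hg)
  rw [bFold_get? n m ca cb k dp.items PySem.Dict.empty
      (by intro q v h; rw [PySem.Dict.get?_empty] at h; cases h) hits,
    PySem.Dict.get?_empty]
  have hsplit : dp.items.map (fun p => itemContrib n m ca cb p k) =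
      dp.items.map (fun p => pyMinInf (if p.1 = k - ca ∧ k < n then some p.2 else none)
        (gShift cb m (if p.1 = k then some p.2 else none))) := by
    refine List.map_congr_left ?_
    intro p _
    unfold itemContrib
    congr 1
    · exact if_congr (by omega) rfl rfl
    · by_cases hp : p.1 = k
      · simp [hp, gShift]
      · simp [hp, gShift]
  rw [hsplit, lminO_map_min]
  have h1 : lminO (dp.items.map fun p => if p.1 = k - ca ∧ k < n then some p.2 else none) =
      (if k < n then rowB S (k - ca) else none) := by
    by_cases hk : k < n
    · rw [if_pos hk, ← hdp, ← items_lookup dp (k - ca) hnd]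
      congr 1
      exact List.map_congr_left (fun p _ => by simp [hk])
    · rw [if_neg hk, lminO_of_all_none ?_]
      intro x hx
      rcases List.mem_map.1 hx with ⟨p, _, rfl⟩
      simp [hk]
  have h2 : lminO (dp.items.map fun p => gShift cb m (if p.1 = k then some p.2 else none)) =
      gShift cb m (rowB S k) := by
    rw [lminO_map_gShift, items_lookup dp k hnd, hdp]
  rw [h1, h2, rowB_step]
  rfl

-- === outer folds ===
theorem foldl_append_getLast {γ : Type} (g : List (Option Int) → γ → List (Option Int)) :
    ∀ (l : List γ) (rs : List (List (Option Int))),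
      (l.foldl (fun rows t => rows ++ [g (rows.getLastD []) t]) rs).getLastD [] =
        l.foldl g (rs.getLastD []) := by
  intro l
  induction l with
  | nil => intro rs; rfl
  | cons t l ih =>
    intro rs
    rw [List.foldl_cons, List.foldl_cons, ih, List.getLastD_concat]

theorem A_fold (n m : Int) (hm : 1 ≤ m) :
    ∀ (info : List (List Int)) (S : List (Int × Int)) (row : List (Option Int)),
      (∀ t ∈ info, t.length = 2 ∧ 0 ≤ t.getD 1 0) → Bnd m S → row.length = m.toNat →
      (∀ j : Nat, j < m.toNat → row.getD j none = colA S j) →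
      (info.foldl (fun r t => (List.range m.toNat).foldl (aInnerBody n m (unpack2 t).1 (unpack2 t).2 r) (List.replicate m.toNat none)) row).length = m.toNat ∧
      ∀ j : Nat, j < m.toNat →
        (info.foldl (fun r t => (List.range m.toNat).foldl (aInnerBody n m (unpack2 t).1 (unpack2 t).2 r) (List.replicate m.toNat none)) row).getD j none =
          colA (info.foldl (fun S t => stepS n m (unpack2 t).1 (unpack2 t).2 S) S) j := by
  intro info
  induction info with
  | nil => intro S row _ _ hlen hrow; exact ⟨hlen, hrow⟩
  | cons t info ih =>
    intro S row hts hS hlen hrow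
    rw [List.foldl_cons, List.foldl_cons]
    have htcb : 0 ≤ (unpack2 t).2 := by
      obtain ⟨ht2, htcb⟩ := hts t List.mem_cons_self
      rcases t with _ | ⟨x, t⟩; · simp at ht2
      rcases t with _ | ⟨y, t⟩; · simp at ht2
      rcases t with _ | ⟨z, t⟩; · simpa using htcb
      · simp at ht2
    obtain ⟨hlen', hrow'⟩ :=
      aRow_step n m (unpack2 t).1 (unpack2 t).2 hm htcb row S hS hlen hrow
    exact ih _ _ (fun u hu => hts u (List.mem_cons_of_mem _ hu)) (bnd_stepS htcb hS) hlen' hrow'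

theorem B_fold (n m : Int) :
    ∀ (info : List (List Int)) (S : List (Int × Int)) (dp : PySem.Dict Int Int),
      (∀ t ∈ info, t.length = 2 ∧ 0 ≤ t.getD 1 0) → Bnd m S → dp.keys.Nodup →
      (∀ a, dp.get? a = rowB S a) →
      (info.foldl (fun d t => d.items.foldl (bInnerBody n m (unpack2 t).1 (unpack2 t).2) PySem.Dict.empty) dp).keys.Nodup ∧
      ∀ a, (info.foldl (fun d t => d.items.foldl (bInnerBody n m (unpack2 t).1 (unpack2 t).2) PySem.Dict.empty) dp).get? a =
        rowB (info.foldl (fun S t => stepS n m (unpack2 t).1 (unpack2 t).2 S) S) a := by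
  intro info
  induction info with
  | nil => intro S dp _ _ hnd hdp; exact ⟨hnd, hdp⟩
  | cons t info ih =>
    intro S dp hts hS hnd hdp
    rw [List.foldl_cons, List.foldl_cons]
    have htcb : 0 ≤ (unpack2 t).2 := by
      obtain ⟨ht2, htcb⟩ := hts t List.mem_cons_self
      rcases t with _ | ⟨x, t⟩; · simp at ht2
      rcases t with _ | ⟨y, t⟩; · simp at ht2
      rcases t with _ | ⟨z, t⟩; · simpa using htcb
      · simp at ht2
    refine ih _ _ (fun u hu => hts u (List.mem_cons_of_mem _ hu)) (bnd_stepS htcb hS)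
      (bFold_nodup _ _ _ _ dp.items PySem.Dict.empty
        (by rw [PySem.Dict.keys_empty]; exact List.nodup_nil))
      (fun k => bDict_step n m (unpack2 t).1 (unpack2 t).2 dp S hS hnd hdp k)

theorem bnd_fold (n m : Int) :
    ∀ (info : List (List Int)) (S : List (Int × Int)),
      (∀ t ∈ info, t.length = 2 ∧ 0 ≤ t.getD 1 0) → Bnd m S →
      Bnd m (info.foldl (fun S t => stepS n m (unpack2 t).1 (unpack2 t).2 S) S) := by
  intro info
  induction info with
  | nil => intro S _ hS; exact hS
  | cons t info ih =>
    intro S hts hS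
    rw [List.foldl_cons]
    have htcb : 0 ≤ (unpack2 t).2 := by
      obtain ⟨ht2, htcb⟩ := hts t List.mem_cons_self
      rcases t with _ | ⟨x, t⟩; · simp at ht2
      rcases t with _ | ⟨y, t⟩; · simp at ht2
      rcases t with _ | ⟨z, t⟩; · simpa using htcb
      · simp at ht2
    exact ih _ (fun u hu => hts u (List.mem_cons_of_mem _ hu)) (bnd_stepS htcb hS)

-- === final extraction ===
theorem cols_min (m : Int) (S : List (Int × Int)) (hS : Bnd m S) :
    lminO ((List.range m.toNat).map (fun j : Nat => colA S (j : Int))) = fstMin S := by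
  induction S with
  | nil =>
    rw [fstMin, List.map_nil]
    exact lminO_of_all_none (by
      intro x hx
      rcases List.mem_map.1 hx with ⟨j, _, rfl⟩
      rfl)
  | cons p S ih =>
    have hp := hS p List.mem_cons_self
    have hS' : Bnd m S := fun q hq => hS q (List.mem_cons_of_mem _ hq)
    have hcol : ∀ j ∈ List.range m.toNat, colA (p :: S) (j : Int) =
        pyMinInf (if j = p.2.toNat then some p.1 else none) (colA S (j : Int)) := by
      intro j _
      rw [colA, colA, List.map_cons, lminO_cons]
      congr 1
      by_cases h : p.2 = (j : Int)
      · rw [if_pos h, if_pos (by omega)]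
      · rw [if_neg h, if_neg (by omega)]
    rw [List.map_congr_left hcol, lminO_map_min,
      lminO_map_ite_nodup _ _ _ (List.nodup_range) (List.mem_range.2 (by omega)),
      ih hS']
    rfl

theorem row_min (m : Int) (S : List (Int × Int)) (hS : Bnd m S) (row : List (Option Int))
    (hlen : row.length = m.toNat) (hrow : ∀ j : Nat, j < m.toNat → row.getD j none = colA S j) :
    row.foldl pyMinInf none = fstMin S := by
  have hrow' : row = (List.range m.toNat).map (fun j : Nat => colA S (j : Int)) := by
    apply List.ext_getElem
    · simp [hlen]
    · intro i h1 h2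
      have hi : i < m.toNat := by simpa [hlen] using h1
      have hx := hrow i hi
      rw [List.getD_eq_getElem?_getD, List.getElem?_eq_getElem h1] at hx
      simp only [Option.getD_some] at hx
      simp only [List.getElem_map, List.getElem_range]
      exact hx
  calc row.foldl pyMinInf none
      = pyMinInf none (lminO ((List.range m.toNat).map (fun j : Nat => colA S (j : Int)))) := by
        rw [hrow', foldl_pyMinInf]
    _ = lminO ((List.range m.toNat).map (fun j : Nat => colA S (j : Int))) := rfl
    _ = fstMin S := cols_min m S hS

theorem foldl_min_pull (t : List Int) : ∀ a b : Int, t.foldl min (min a b) = min a (t.foldl min b) := by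
  induction t with
  | nil => intro a b; rfl
  | cons c t ih =>
    intro a b
    rw [List.foldl_cons, List.foldl_cons, min_assoc, ih]
theorem lminInt_cons (x : Int) (t : List Int) :
    lminO ((x :: t).map some) = some (t.foldl min x) := by
  induction t generalizing x with
  | nil => rfl
  | cons y t ih =>
    rw [List.map_cons, lminO_cons, ih, List.foldl_cons, foldl_min_pull]
    rfl
theorem minD_eq_lminInt (l : List Int) :
    PySem.List.minD l (fun x => x) (-1) = (match lminO (l.map some) with | some v => v | none => -1) := by
  cases l with
  | nil => rfl
  | cons x t =>
    unfold PySem.List.minD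
    rw [PySem.List.min?_id_cons, lminInt_cons]
    rfl
theorem lminInt_mem_iff (l l' : List Int) (h : ∀ x, x ∈ l ↔ x ∈ l') :
    lminO (l.map some) = lminO (l'.map some) := by
  have hnone : ∀ (l l' : List Int), (∀ x, x ∈ l ↔ x ∈ l') →
      lminO (l.map some) = none → lminO (l'.map some) = none := by
    intro l l' h hn
    cases l' with
    | nil => rfl
    | cons y t =>
      exfalso
      have hy : y ∈ l := (h y).2 List.mem_cons_self
      have := lminO_eq_none_forall hn (some y) (List.mem_map_of_mem hy)
      exact Option.some_ne_none y this
  cases ha : lminO (l.map some) with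
  | none => exact (hnone l l' h ha).symm
  | some v =>
    cases hb : lminO (l'.map some) with
    | none =>
      exfalso
      have := hnone l' l (fun x => (h x).symm) hb
      rw [ha] at this
      exact Option.some_ne_none v this
    | some w =>
      have hv : v ∈ l := by
        rcases List.mem_map.1 (lminO_some_mem ha) with ⟨z, hz, he⟩
        cases he; exact hz
      have hw : w ∈ l' := by
        rcases List.mem_map.1 (lminO_some_mem hb) with ⟨z, hz, he⟩
        cases he; exact hz
      have h1 : w ≤ v := lminO_le hb (some v) (List.mem_map_of_mem ((h v).1 hv)) v rfl
      have h2 : v ≤ w := lminO_le ha (some w) (List.mem_map_of_mem ((h w).2 hw)) w rfl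
      exact congrArg some (le_antisymm h2 h1)
theorem keys_min (m : Int) (S : List (Int × Int)) (d : PySem.Dict Int Int)
    (hd : ∀ a, d.get? a = rowB S a) :
    lminO (d.keys.map some) = fstMin S := by
  have hmem : ∀ x, x ∈ d.keys ↔ x ∈ S.map Prod.fst := by
    intro x
    constructor
    · intro hx
      by_contra hns
      have h1 : rowB S x = none := (rowB_eq_none_iff S x).2 hns
      have h2 : d.get? x = none := by rw [hd]; exact h1
      exact (PySem.Dict.get?_eq_none_iff_not_mem_keys d x).1 h2 hx
    · intro hx
      by_contra hnk
      have h1 : d.get? x = none := (PySem.Dict.get?_eq_none_iff_not_mem_keys d x).2 hnk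
      rw [hd] at h1
      exact (rowB_eq_none_iff S x).1 h1 hx
  rw [lminInt_mem_iff d.keys (S.map Prod.fst) hmem, List.map_map]
  rfl

-- ===== VERDICT (by name: the statement is the Claim_ definition above) =====
theorem solution_spec : Claim_equal_solution := by
  intro info n m _ hpre
  obtain ⟨hm, hts⟩ := hpre
  unfold Spec_solution solution solution_alt
  have hS0 : Bnd m [((0 : Int), (0 : Int))] := by
    intro p hp
    simp only [List.mem_singleton] at hp
    subst hp
    exact ⟨le_refl 0, by omega⟩
  have hrow0len : ((List.replicate m.toNat (none : Option Int)).set 0 (some 0)).length = m.toNat := by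
    simp
  have hrow0 : ∀ j : Nat, j < m.toNat →
      ((List.replicate m.toNat (none : Option Int)).set 0 (some 0)).getD j none =
        colA [((0 : Int), (0 : Int))] (j : Int) := by
    intro j hj
    rw [getDset]
    by_cases hj0 : j = 0
    · subst hj0
      rw [if_pos ⟨rfl, by simp; omega⟩]
      decide
    · rw [if_neg (by tauto), List.getD_eq_getElem?_getD, List.getElem?_replicate, if_pos hj]
      rw [colA]
      simp only [List.map_cons, List.map_nil]
      rw [if_neg (by omega : ¬((0 : Int) = (j : Int)))]
      rfl
  obtain ⟨hlenF, hrowF⟩ := A_fold n m hm info [((0 : Int), (0 : Int))] _ hts hS0 hrow0len hrow0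
  have hSfB := bnd_fold n m info [((0 : Int), (0 : Int))] hts hS0
  have hA : ((info.foldl (fun rows trace =>
      rows ++ [(List.range m.toNat).foldl
        (aInnerBody n m (unpack2 trace).1 (unpack2 trace).2 (rows.getLastD []))
        (List.replicate m.toNat none)])
      [(List.replicate m.toNat (none : Option Int)).set 0 (some 0)]).getLastD []).foldl
      pyMinInf none =
      fstMin (info.foldl (fun S t => stepS n m (unpack2 t).1 (unpack2 t).2 S)
        [((0 : Int), (0 : Int))]) := by
    rw [foldl_append_getLast (fun r t => (List.range m.toNat).foldl
        (aInnerBody n m (unpack2 t).1 (unpack2 t).2 r) (List.replicate m.toNat none)) info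
      [(List.replicate m.toNat (none : Option Int)).set 0 (some 0)]]
    exact row_min m _ hSfB _ hlenF hrowF
  rw [hA]
  have hnd0 : (PySem.Dict.empty.insert (0 : Int) (0 : Int)).keys.Nodup :=
    PySem.Dict.nodup_keys_insert _ _ _ (by rw [PySem.Dict.keys_empty]; exact List.nodup_nil)
  have hdp0 : ∀ a, (PySem.Dict.empty.insert (0 : Int) (0 : Int)).get? a =
      rowB [((0 : Int), (0 : Int))] a := by
    intro a
    rw [PySem.Dict.get?_insert, rowB]
    simp only [List.map_cons, List.map_nil]
    by_cases ha : a = 0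
    · rw [if_pos ha, if_pos (by omega)]
      rfl
    · rw [if_neg ha, if_neg (by omega), PySem.Dict.get?_empty]
      rfl
  obtain ⟨hndF, hdpF⟩ := B_fold n m info [((0 : Int), (0 : Int))] _ hts hS0 hnd0 hdp0
  rw [minD_eq_lminInt, keys_min m _ _ hdpF]
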